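-- pv_equiv track=rewrite | github.com/voitetskyi/ibb | ibb/util/quote_builder.py | read_quote_spec
-- ===== SOURCE A (Python) =====
-- def read_quote_spec(s):
--     spec = {'open': -1, 'high': -1, 'low': -1, 'close': -1}
--     for i in range(len(s)):
--         if s[i] == ' ' or s[i] == '|':
--             return spec
--         if s[i] == '.':
--             continue
--         if s[i].isnumeric():
--             if i == 0:
--                 spec['open'] = int(s[i])
--             if i == 1:
--                 spec['high'] = int(s[i])
--             if i == 2:
--                 spec['low'] = int(s[i])
--             if i == 3:
--                 spec['close'] = int(s[i])
--
--     return spec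
-- ===== SOURCE B (Python) =====
-- def read_quote_spec(s):
--     spec = {'open': -1, 'high': -1, 'low': -1, 'close': -1}
--     prefix = []
--     for c in s[:4]:
--         if c == ' ' or c == '|':
--             break
--         prefix.append(c)
--     for key, c in zip(['open', 'high', 'low', 'close'], prefix):
--         if c.isnumeric():
--             spec[key] = int(c)
--     return spec
-- ===== Notes on version B (the rewrite author's own statement) =====
-- stated objective: faster
-- what changed: B replaces A's whole-string loop with positional i==0..3 branches by a two-stage decomposition: compute the usable prefix of s[:4] (chars up to the first ' ' or '|'), then fill the dict by zipping the fixed key list against that prefix, so B never scans past the fourth character.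
import Mathlib
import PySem

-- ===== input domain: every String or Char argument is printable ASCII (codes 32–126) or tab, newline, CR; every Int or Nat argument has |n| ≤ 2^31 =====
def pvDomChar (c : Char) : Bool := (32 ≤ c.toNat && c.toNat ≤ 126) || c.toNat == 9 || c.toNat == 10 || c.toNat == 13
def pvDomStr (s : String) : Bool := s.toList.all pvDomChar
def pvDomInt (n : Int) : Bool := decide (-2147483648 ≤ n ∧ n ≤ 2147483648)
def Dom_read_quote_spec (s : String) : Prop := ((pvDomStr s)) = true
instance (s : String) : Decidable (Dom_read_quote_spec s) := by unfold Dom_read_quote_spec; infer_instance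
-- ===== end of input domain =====

-- B replaces A's whole-string loop with positional i==0..3 branches by a two-stage
-- decomposition: first compute the usable prefix of s[:4], then zip the fixed key list
-- against it (objective: simpler).
-- Python's str.isnumeric is Char.isDigit on the ASCII domain; int(c) on an ASCII digit
-- is c.toNat - 48 (both exact on Dom).

-- ===== PORT A =====
-- the 'for i in range(len(s))' loop of A: chars of s paired with their index i
def readA_loop : List Char → Nat → PySem.Dict String Int → PySem.Dict String Int
  | [], _, spec => spec
  | c :: rest, i, spec =>
    if c = ' ' ∨ c = '|' then spec
    else if c = '.' then readA_loop rest (i + 1) spec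
    else if c.isDigit then
      let s0 := if i = 0 then spec.insert "open" ((c.toNat : Int) - 48) else spec
      let s1 := if i = 1 then s0.insert "high" ((c.toNat : Int) - 48) else s0
      let s2 := if i = 2 then s1.insert "low" ((c.toNat : Int) - 48) else s1
      let s3 := if i = 3 then s2.insert "close" ((c.toNat : Int) - 48) else s2
      readA_loop rest (i + 1) s3
    else readA_loop rest (i + 1) spec

def read_quote_spec (s : String) : List (String × Int) :=
  (readA_loop s.toList 0
    (PySem.Dict.ofList [("open", -1), ("high", -1), ("low", -1), ("close", -1)])).items

-- ===== PORT B =====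
-- the chars of s[:4] taken while they are not ' ' or '|' (Source B's first loop)
def readB_prefix : List Char → List Char
  | [] => []
  | c :: rest => if c = ' ' ∨ c = '|' then [] else c :: readB_prefix rest

def read_quote_spec_alt (s : String) : List (String × Int) :=
  let spec0 : PySem.Dict String Int :=
    PySem.Dict.ofList [("open", -1), ("high", -1), ("low", -1), ("close", -1)]
  let pre := readB_prefix (PySem.List.slice s.toList none (some 4))
  ((List.zip ["open", "high", "low", "close"] pre).foldl
    (fun spec kc =>
      if kc.2.isDigit then spec.insert kc.1 ((kc.2.toNat : Int) - 48) else spec)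
    spec0).items

-- ===== PRECONDITION & SPEC =====
def Spec_read_quote_spec (s : String) (out : List (String × Int)) : Prop := out = read_quote_spec_alt s
instance (s : String) (out : List (String × Int)) : Decidable (Spec_read_quote_spec s out) := by unfold Spec_read_quote_spec; infer_instance

-- ===== CLAIM (what is proved, stated in full; the proofs are below) =====
def Claim_equal_read_quote_spec : Prop := ∀ (s : String), Dom_read_quote_spec s → Spec_read_quote_spec s (read_quote_spec s)

-- ===== LEMMAS AND PROOFS =====
-- past position 3, A's loop only scans for ' '/'|' and never changes the dict
theorem readA_loop_ge4 (cs : List Char) : ∀ (spec : PySem.Dict String Int) (i : Nat), 4 ≤ i →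
    readA_loop cs i spec = spec := by
  induction cs with
  | nil => intro spec i _; rfl
  | cons c rest ih =>
    intro spec i hi
    simp only [readA_loop]
    split_ifs <;> first | rfl | omega | exact ih spec (i + 1) (by omega)

theorem readA_loop_4 (cs : List Char) (spec : PySem.Dict String Int) :
    readA_loop cs 4 spec = spec := readA_loop_ge4 cs spec 4 le_rfl

-- invariant: A's loop from position i onwards equals B's fill pass over the
-- remaining keys zipped with the prefix of the next 4 - i characters
theorem loop_eq_fold (cs : List Char) : ∀ (i : Nat) (spec : PySem.Dict String Int),
    readA_loop cs i spec =
      (List.zip (["open", "high", "low", "close"].drop i) (readB_prefix (cs.take (4 - i)))).foldl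
        (fun spec kc =>
          if kc.2.isDigit then spec.insert kc.1 ((kc.2.toNat : Int) - 48) else spec) spec := by
  induction cs with
  | nil => intro i spec; simp [readA_loop, readB_prefix]
  | cons c rest ih =>
    intro i spec
    have hdot : ('.' : Char).isDigit = false := by decide
    match i with
    | 0 =>
      simp only [readA_loop]
      split_ifs <;>
        first
        | omega
        | (exfalso; assumption)
        | (simp [*, readB_prefix, hdot, readA_loop_4]; done)
        | simpa [*, readB_prefix, hdot, readA_loop_4] using ih 1 _
        | (simp_all [readB_prefix, hdot, readA_loop_4]; done)
    | 1 =>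
      simp only [readA_loop]
      split_ifs <;>
        first
        | omega
        | (exfalso; assumption)
        | (simp [*, readB_prefix, hdot, readA_loop_4]; done)
        | simpa [*, readB_prefix, hdot, readA_loop_4] using ih 2 _
        | (simp_all [readB_prefix, hdot, readA_loop_4]; done)
    | 2 =>
      simp only [readA_loop]
      split_ifs <;>
        first
        | omega
        | (exfalso; assumption)
        | (simp [*, readB_prefix, hdot, readA_loop_4]; done)
        | simpa [*, readB_prefix, hdot, readA_loop_4] using ih 3 _
        | (simp_all [readB_prefix, hdot, readA_loop_4]; done)
    | 3 =>
      simp only [readA_loop]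
      split_ifs <;>
        first
        | omega
        | (exfalso; assumption)
        | (simp [*, readB_prefix, hdot, readA_loop_4]; done)
        | simpa [*, readB_prefix, hdot, readA_loop_4] using ih 4 _
        | (simp_all [readB_prefix, hdot, readA_loop_4]; done)
    | n + 4 =>
      rw [readA_loop_ge4 _ _ _ (by omega)]
      simp [readB_prefix, show 4 - (n + 4) = 0 by omega]

theorem read_quote_spec_eq_alt (s : String) : read_quote_spec s = read_quote_spec_alt s := by
  simp only [read_quote_spec, read_quote_spec_alt]
  have hs := PySem.List.slice_to s.toList (show (0 : Int) ≤ 4 by norm_num)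
  norm_num at hs
  rw [hs]
  have h := loop_eq_fold s.toList 0
    (PySem.Dict.ofList [("open", -1), ("high", -1), ("low", -1), ("close", -1)])
  simp only [Nat.sub_zero, List.drop] at h
  simp [h]

-- ===== VERDICT (by name: the statement is the Claim_ definition above) =====
theorem read_quote_spec_spec : Claim_equal_read_quote_spec := by
  intro s _
  unfold Spec_read_quote_spec
  exact read_quote_spec_eq_alt s
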